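-- pv_equiv track=rewrite | github.com/suarezvictor/CflexHDL | cflexparser/clangparser.py | remove_type_qualifiers
-- ===== SOURCE A (Python) =====
-- def remove_type_qualifiers(typname):
--     if typname.endswith("&"):
--         return remove_type_qualifiers(typname[:-2])
--     if typname.startswith("const "):
--         return remove_type_qualifiers(typname[6:])
--     if typname.startswith("volatile "):
--         return remove_type_qualifiers(typname[9:])
--     return typname
-- ===== SOURCE B (Python) =====
-- def remove_type_qualifiers(typname):
--     # count trailing '&' reduction steps by index arithmetic (each step removes 2 chars)
--     n = len(typname)
--     k = 0
--     while n - 2 * k > 0 and typname[n - 1 - 2 * k] == "&":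
--         k += 1
--     s = typname[:max(n - 2 * k, 0)]
--     # advance a cursor past leading qualifiers, slice once at the end
--     i = 0
--     while True:
--         if s.startswith("const ", i):
--             i += 6
--         elif s.startswith("volatile ", i):
--             i += 9
--         else:
--             return s[i:]
-- ===== Notes on version B (the rewrite author's own statement) =====
-- stated objective: alternative
-- what changed: Replaces A's recursion that re-slices the string at every step by index arithmetic: a counting loop determines how many trailing-ampersand two-char steps to cut, then a cursor advances past leading const/volatile qualifiers via startswith-with-offset, and the string is sliced once at the end.
import Mathlib
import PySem

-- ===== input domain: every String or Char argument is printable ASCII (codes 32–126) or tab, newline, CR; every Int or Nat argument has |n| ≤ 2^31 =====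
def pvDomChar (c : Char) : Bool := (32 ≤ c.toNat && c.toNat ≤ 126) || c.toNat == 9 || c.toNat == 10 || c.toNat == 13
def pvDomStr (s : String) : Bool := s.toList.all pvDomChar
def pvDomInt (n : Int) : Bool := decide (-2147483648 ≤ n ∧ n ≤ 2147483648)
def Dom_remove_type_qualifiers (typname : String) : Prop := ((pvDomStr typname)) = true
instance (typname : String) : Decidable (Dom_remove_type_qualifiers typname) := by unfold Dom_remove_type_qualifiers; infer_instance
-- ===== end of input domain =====

-- B replaces A's recursive re-slicing by index arithmetic: count trailing-'&' steps, advance a cursor past leading qualifiers, slice once (objective: alternative).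

-- termination lemma cited by port A
theorem pvAmpLt (cs : List Char) (h : PySem.Chars.endswith cs "&".toList = true) :
    (PySem.Chars.slice cs none (some (-2))).length < cs.length := by
  have h1 : ("&".toList) <:+ cs := (PySem.Chars.endswith_iff _ _).mp h
  have hlen : 1 ≤ cs.length := by simpa using h1.length_le
  rw [PySem.Chars.slice_eq_listSlice, PySem.List.slice_to_neg_ofNat cs 2 (by omega)]
  simp [List.length_take]; omega

-- termination lemma cited by port A and port B's pvAdvance
theorem pvPrefLenLe (cs p : List Char) (h : PySem.Chars.startswith cs p = true) :
    p.length ≤ cs.length :=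
  ((PySem.Chars.startswith_iff _ _).mp h).length_le

-- ===== PORT A =====
def pvGoA (cs : List Char) : List Char :=
  if h1 : PySem.Chars.endswith cs "&".toList = true then
    pvGoA (PySem.Chars.slice cs none (some (-2)))
  else if h2 : PySem.Chars.startswith cs "const ".toList = true then
    pvGoA (PySem.Chars.slice cs (some 6) none)
  else if h3 : PySem.Chars.startswith cs "volatile ".toList = true then
    pvGoA (PySem.Chars.slice cs (some 9) none)
  else cs
termination_by cs.length
decreasing_by
  · exact pvAmpLt cs h1
  · have := pvPrefLenLe cs "const ".toList h2
    rw [PySem.Chars.slice_eq_listSlice, PySem.List.slice_from _ (by decide)]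
    simp at this ⊢; omega
  · have := pvPrefLenLe cs "volatile ".toList h3
    rw [PySem.Chars.slice_eq_listSlice, PySem.List.slice_from _ (by decide)]
    simp at this ⊢; omega

def remove_type_qualifiers (typname : String) : String :=
  String.ofList (pvGoA typname.toList)

-- ===== PORT B =====
-- while n - 2*k > 0 and typname[n-1-2*k] == '&': k += 1
-- (the guard keeps the index in range, so indexing is ported by getD — exact here)
def pvCountAmp (cs : List Char) (k : Nat) : Nat :=
  if 0 < cs.length - 2 * k ∧ cs.getD (cs.length - 1 - 2 * k) ' ' = '&' then
    pvCountAmp cs (k + 1)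
  else k
termination_by cs.length - 2 * k

-- while True: if s.startswith("const ", i): i += 6 elif s.startswith("volatile ", i): i += 9 else: break
-- (s.startswith(p, i) with 0 ≤ i is ported as startswith on (s.toList.drop i) — exact for nonempty p)
def pvAdvance (cs : List Char) (i : Nat) : Nat :=
  if h2 : PySem.Chars.startswith (cs.drop i) "const ".toList = true then
    pvAdvance cs (i + 6)
  else if h3 : PySem.Chars.startswith (cs.drop i) "volatile ".toList = true then
    pvAdvance cs (i + 9)
  else i
termination_by cs.length - i
decreasing_by
  · have := pvPrefLenLe _ _ h2; simp at this; omega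
  · have := pvPrefLenLe _ _ h3; simp at this; omega

def remove_type_qualifiers_alt (typname : String) : String :=
  let cs := typname.toList
  let s := cs.take (cs.length - 2 * pvCountAmp cs 0)   -- Nat subtraction = Python's max(n-2k, 0)
  String.ofList (s.drop (pvAdvance s 0))

-- ===== PRECONDITION & SPEC =====
def Spec_remove_type_qualifiers (typname : String) (out : String) : Prop := out = remove_type_qualifiers_alt typname
instance (typname : String) (out : String) : Decidable (Spec_remove_type_qualifiers typname out) := by unfold Spec_remove_type_qualifiers; infer_instance

-- ===== CLAIM =====
def Claim_equal_remove_type_qualifiers : Prop := ∀ (typname : String), Dom_remove_type_qualifiers typname → Spec_remove_type_qualifiers typname (remove_type_qualifiers typname)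

-- ===== LEMMAS AND PROOFS =====
-- phase views of A used by the proof
def pvStripAmp (cs : List Char) : List Char :=
  if h1 : PySem.Chars.endswith cs "&".toList = true then
    pvStripAmp (PySem.Chars.slice cs none (some (-2)))
  else cs
termination_by cs.length
decreasing_by exact pvAmpLt cs h1

def pvStripQuals (cs : List Char) : List Char :=
  if h2 : PySem.Chars.startswith cs "const ".toList = true then
    pvStripQuals (PySem.Chars.slice cs (some 6) none)
  else if h3 : PySem.Chars.startswith cs "volatile ".toList = true then
    pvStripQuals (PySem.Chars.slice cs (some 9) none)
  else cs
termination_by cs.length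
decreasing_by
  · have := pvPrefLenLe cs "const ".toList h2
    rw [PySem.Chars.slice_eq_listSlice, PySem.List.slice_from _ (by decide)]
    simp at this ⊢; omega
  · have := pvPrefLenLe cs "volatile ".toList h3
    rw [PySem.Chars.slice_eq_listSlice, PySem.List.slice_from _ (by decide)]
    simp at this ⊢; omega

-- dropping a prefix cannot create a trailing '&'
theorem pvEndsDrop (cs : List Char) (a : Int) (ha : 0 ≤ a)
    (h : PySem.Chars.endswith cs "&".toList = false) :
    PySem.Chars.endswith (PySem.Chars.slice cs (some a) none) "&".toList = false := by
  rw [PySem.Chars.slice_eq_listSlice, PySem.List.slice_from _ ha]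
  rw [Bool.eq_false_iff] at h ⊢
  intro hE
  exact h ((PySem.Chars.endswith_iff _ _).mpr
    (((PySem.Chars.endswith_iff _ _).mp hE).trans (List.drop_suffix _ _)))

-- A's interleaved recursion = the two phases in sequence
theorem pvKey : ∀ (n : Nat) (cs : List Char), cs.length ≤ n →
    pvGoA cs = pvStripQuals (pvStripAmp cs) := by
  intro n
  induction n with
  | zero =>
    intro cs h
    have : cs = [] := List.eq_nil_of_length_eq_zero (Nat.le_zero.mp h)
    subst this
    rw [pvGoA, dif_neg (by decide), dif_neg (by decide), dif_neg (by decide),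
        pvStripAmp, dif_neg (by decide), pvStripQuals, dif_neg (by decide), dif_neg (by decide)]
  | succ n ih =>
    intro cs h
    by_cases h1 : PySem.Chars.endswith cs "&".toList = true
    · rw [pvGoA, dif_pos h1, pvStripAmp, dif_pos h1]
      exact ih _ (by have := pvAmpLt cs h1; omega)
    · rw [pvGoA, dif_neg h1, pvStripAmp, dif_neg h1, pvStripQuals]
      by_cases h2 : PySem.Chars.startswith cs "const ".toList = true
      · rw [dif_pos h2, dif_pos h2]
        have hle := pvPrefLenLe cs "const ".toList h2
        have hlt : (PySem.Chars.slice cs (some 6) none).length < cs.length := by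
          rw [PySem.Chars.slice_eq_listSlice, PySem.List.slice_from _ (by decide)]
          simp at hle ⊢; omega
        rw [ih _ (by omega)]
        have hnoamp := pvEndsDrop cs 6 (by decide) (by simpa using h1)
        rw [pvStripAmp, dif_neg (by simpa using hnoamp)]
      · rw [dif_neg h2]
        by_cases h3 : PySem.Chars.startswith cs "volatile ".toList = true
        · rw [dif_pos h3, dif_neg h2, dif_pos h3]
          have hle := pvPrefLenLe cs "volatile ".toList h3
          have hlt : (PySem.Chars.slice cs (some 9) none).length < cs.length := by
            rw [PySem.Chars.slice_eq_listSlice, PySem.List.slice_from _ (by decide)]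
            simp at hle ⊢; omega
          rw [ih _ (by omega)]
          have hnoamp := pvEndsDrop cs 9 (by decide) (by simpa using h1)
          rw [pvStripAmp, dif_neg (by simpa using hnoamp)]
        · rw [dif_neg h3, dif_neg h2, dif_neg h3]

-- endswith "&" as a last-character test
theorem pvEndsIff (cs : List Char) :
    PySem.Chars.endswith cs "&".toList = true ↔ 0 < cs.length ∧ cs.getD (cs.length - 1) ' ' = '&' := by
  rw [PySem.Chars.endswith_iff]
  constructor
  · intro h
    obtain ⟨t, ht⟩ := h
    have ht' : cs = t ++ ['&'] := by simpa using ht.symm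
    subst ht'
    refine ⟨by simp, ?_⟩
    simp [List.getD]
  · rintro ⟨hpos, hlast⟩
    rcases List.eq_nil_or_concat cs with rfl | ⟨t, c, rfl⟩
    · simp at hpos
    · have : c = '&' := by
        simpa [List.getD, List.concat_eq_append] using hlast
      subst this
      exact ⟨t, by simp [List.concat_eq_append]⟩

-- phase 1: the counting loop computes pvStripAmp as a take
theorem pvCountSpec : ∀ (fuel k : Nat) (cs : List Char), cs.length - 2 * k ≤ fuel →
    cs.take (cs.length - 2 * pvCountAmp cs k) = pvStripAmp (cs.take (cs.length - 2 * k)) := by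
  intro fuel
  induction fuel with
  | zero =>
    intro k cs h
    have hz : cs.length - 2 * k = 0 := by omega
    rw [pvCountAmp]
    rw [if_neg (by omega)]
    rw [hz, List.take_zero, pvStripAmp, dif_neg (by decide)]
  | succ n ih =>
    intro k cs h
    set m := cs.length - 2 * k with hm
    by_cases hc : 0 < m ∧ cs.getD (cs.length - 1 - 2 * k) ' ' = '&'
    · rw [pvCountAmp, if_pos hc]
      have hE : PySem.Chars.endswith (cs.take m) "&".toList = true := by
        rw [pvEndsIff]
        refine ⟨by simp [List.length_take]; omega, ?_⟩
        have hlen : (cs.take m).length = m := by simp [List.length_take]; omega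
        rw [hlen]
        have hidx : m - 1 = cs.length - 1 - 2 * k := by omega
        have : (cs.take m).getD (m - 1) ' ' = cs.getD (m - 1) ' ' := by
          simp [List.getD, List.getElem?_take, hc.1]
        rw [this, hidx]; exact hc.2
      rw [pvStripAmp, dif_pos hE]
      have hslice : PySem.Chars.slice (cs.take m) none (some (-2)) = cs.take (cs.length - 2 * (k + 1)) := by
        rw [PySem.Chars.slice_eq_listSlice, PySem.List.slice_to_neg_ofNat _ 2 (by omega)]
        rw [List.take_take]
        congr 1
        simp [List.length_take]; omega
      rw [hslice]
      exact ih (k + 1) cs (by omega)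
    · rw [pvCountAmp, if_neg hc]
      have hE : PySem.Chars.endswith (cs.take m) "&".toList = false := by
        rw [Bool.eq_false_iff]
        intro hT
        rw [pvEndsIff] at hT
        apply hc
        have hlen : (cs.take m).length = m := by simp [List.length_take]; omega
        refine ⟨by omega, ?_⟩
        have hidx : cs.length - 1 - 2 * k = m - 1 := by
          have : 0 < m := by rw [← hlen]; exact hT.1
          omega
        rw [hidx]
        have hpos : 0 < m := by rw [← hlen]; exact hT.1
        have : (cs.take m).getD (m - 1) ' ' = cs.getD (m - 1) ' ' := by
          simp [List.getD, List.getElem?_take, hpos]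
        rw [← this]
        have := hT.2; rw [hlen] at this; exact this
      rw [pvStripAmp, dif_neg (by simpa using hE)]

-- phase 2: the cursor loop computes pvStripQuals as a drop
theorem pvAdvanceSpec : ∀ (fuel : Nat) (cs : List Char) (i : Nat), cs.length - i ≤ fuel →
    cs.drop (pvAdvance cs i) = pvStripQuals (cs.drop i) := by
  intro fuel
  induction fuel with
  | zero =>
    intro cs i h
    have hd : cs.drop i = [] := by
      apply List.drop_eq_nil_of_le; omega
    rw [pvAdvance, dif_neg (by rw [hd]; decide), dif_neg (by rw [hd]; decide),
        hd, pvStripQuals, dif_neg (by decide), dif_neg (by decide)]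
  | succ n ih =>
    intro cs i h
    by_cases h2 : PySem.Chars.startswith (cs.drop i) "const ".toList = true
    · have hle := pvPrefLenLe _ _ h2
      simp at hle
      rw [pvAdvance, dif_pos h2, pvStripQuals, dif_pos h2]
      rw [PySem.Chars.slice_eq_listSlice, PySem.List.slice_from _ (by decide)]
      have : (cs.drop i).drop (6 : Int).toNat = cs.drop (i + 6) := by
        rw [List.drop_drop]; congr 1
      rw [this]
      exact ih cs (i + 6) (by omega)
    · by_cases h3 : PySem.Chars.startswith (cs.drop i) "volatile ".toList = true
      · have hle := pvPrefLenLe _ _ h3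
        simp at hle
        rw [pvAdvance, dif_neg h2, dif_pos h3, pvStripQuals, dif_neg h2, dif_pos h3]
        rw [PySem.Chars.slice_eq_listSlice, PySem.List.slice_from _ (by decide)]
        have : (cs.drop i).drop (9 : Int).toNat = cs.drop (i + 9) := by
          rw [List.drop_drop]; congr 1
        rw [this]
        exact ih cs (i + 9) (by omega)
      · rw [pvAdvance, dif_neg h2, dif_neg h3, pvStripQuals, dif_neg h2, dif_neg h3]

-- ===== VERDICT =====
theorem remove_type_qualifiers_spec : Claim_equal_remove_type_qualifiers := by
  intro typname _
  unfold Spec_remove_type_qualifiers remove_type_qualifiers remove_type_qualifiers_alt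
  rw [pvKey typname.toList.length typname.toList le_rfl]
  have h1 := pvCountSpec typname.toList.length 0 typname.toList (by omega)
  simp only [Nat.mul_zero, Nat.sub_zero, List.take_length] at h1
  have h2 := pvAdvanceSpec (typname.toList.take (typname.toList.length - 2 * pvCountAmp typname.toList 0)).length (typname.toList.take (typname.toList.length - 2 * pvCountAmp typname.toList 0)) 0 (by omega)
  rw [List.drop_zero] at h2
  rw [← h1, ← h2]
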